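-- pv_equiv track=rewrite | github.com/lts010/CSCI203 | visualizeText.py | dealWithHyphens
-- ===== SOURCE A (Python) =====
-- def dealWithHyphens(aList):
--     '''
--     dealWithHyphens takes in a list aList and removes any double hyphens that connect words,
--     as well as removes any isolated hyphens that exist between words. (e.g. word - word).
--     dealWithHyphens then returns aList
--     Input: aList - any list
--     Output: aList - the same list but without hyphens we don't want
--
--     >>> stringOne = "Right now--right now--American oil production is the highest that it's been in 8 years."
--     >>> stringTwo = "A simple majority is no longer enough to get anything--even routine business--passed through the Senate."
--     >>> stringThree = "these dead shall not have died in vain - that this nation"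
--     >>> listOne = stringOne.split()
--     >>> listTwo = stringTwo.split()
--     >>> listThree = stringThree.split()
--     >>> dealWithHyphens(listOne)
--     ['Right', 'now', 'now', 'oil', 'production', 'is', 'the', 'highest', 'that', "it's", 'been', 'in', '8', 'years.', 'right', 'American']
--     >>> dealWithHyphens(listTwo)
--     ['A', 'simple', 'majority', 'is', 'no', 'longer', 'enough', 'to', 'get', 'anything', 'routine', 'business', 'through', 'the', 'Senate.', 'even', 'passed']
--     >>> dealWithHyphens(listThree)
--     ['these', 'dead', 'shall', 'not', 'have', 'died', 'in', 'vain', 'that', 'this', 'nation']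
--     >>>
--     '''
--
--     aList = [x for x in aList if x != '-'] #use a list comprehension to get rid of lonely hyphens
--     for i in range(len(aList)): #go through the list by index (minus one so the index doesn't go out of range)
--         if '--' in aList[i]: #if there's a double hyphen
--             hyphenIndex = aList[i].find('--') #set hyphenIndex equal to the index of the first part of the double hyphen
--             newWord = aList[i][hyphenIndex + 2:] #make the part of the word after the double hyphen a totally new word
--             aList += [newWord] # add that new word to the list
--             aList[i] = aList[i][0:hyphenIndex] #redefine aList[i] as the part of the word before the double hyphen
--     return aList
-- ===== SOURCE B (Python) =====
-- def dealWithHyphens(aList):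
--     # Decorate-stable-sort-undecorate: tag every piece with a rank (0 = in-place
--     # word or head, 1 = tail split off after the first '--'), then a stable sort
--     # by rank moves all tails to the back while keeping appearance order.
--     keyed = []
--     for w in aList:
--         if w == '-':
--             continue
--         j = w.find('--')
--         if j == -1:
--             keyed.append((0, w))
--         else:
--             keyed.append((0, w[:j]))
--             keyed.append((1, w[j + 2:]))
--     keyed.sort(key=lambda t: t[0])
--     return [w for _, w in keyed]
-- ===== Notes on version B (the rewrite author's own statement) =====
-- stated objective: alternative
-- what changed: B replaces A's in-place index loop on a growing list with decorate-sort-undecorate: each kept piece is tagged with rank 0 (word or head before the first '--') or 1 (tail after it), a stable sort by rank moves the tails to the back preserving appearance order, and the ranks are stripped off.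
import Mathlib
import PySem

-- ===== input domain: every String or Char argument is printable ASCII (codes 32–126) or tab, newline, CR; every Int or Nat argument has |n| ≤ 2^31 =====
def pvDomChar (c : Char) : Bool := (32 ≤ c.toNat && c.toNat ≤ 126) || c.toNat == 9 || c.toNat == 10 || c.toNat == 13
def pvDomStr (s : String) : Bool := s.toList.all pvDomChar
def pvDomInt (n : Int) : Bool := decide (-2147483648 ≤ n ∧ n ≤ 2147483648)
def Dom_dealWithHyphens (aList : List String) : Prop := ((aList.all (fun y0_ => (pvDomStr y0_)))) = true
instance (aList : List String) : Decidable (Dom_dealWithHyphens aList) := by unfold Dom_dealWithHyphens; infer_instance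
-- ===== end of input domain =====

-- B replaces A's in-place index loop on a growing list with decorate-stable-sort-undecorate (rank 0 = head piece, rank 1 = split-off tail); an alternative algorithm of similar cost.


-- ===== PORT A =====
-- body of A's for-loop: state is the (mutating, growing) list, i the current index
def dealWithHyphensStep (st : List String) (i : Int) : List String :=
  match PySem.List.pyGet? st i with
  | none => st  -- unreachable: i < len(st) throughout the loop
  | some w =>
    if PySem.Str.isIn "--" w then
      let hyphenIndex := PySem.Str.find w "--"
      let newWord := PySem.Str.slice w (some (hyphenIndex + 2)) none
      let st' := st ++ [newWord]
      st'.set i.toNat (PySem.Str.slice w (some 0) (some hyphenIndex))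
    else st

def dealWithHyphens (aList : List String) : List String :=
  let aList := aList.filter (fun x => x ≠ "-")
  (PySem.List.pyRange 0 aList.length 1).foldl dealWithHyphensStep aList

-- ===== PORT B =====
-- Source B's loop body: skip lone hyphens, append (0, word-or-head) and, after a '--', (1, tail)
def dealWithHyphensKeyedStep (acc : List (Int × String)) (w : String) : List (Int × String) :=
  if w = "-" then acc
  else
    let j := PySem.Str.find w "--"
    if j = -1 then acc ++ [((0 : Int), w)]
    else acc ++ [((0 : Int), PySem.Str.slice w none (some j)),
                 ((1 : Int), PySem.Str.slice w (some (j + 2)) none)]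

def dealWithHyphens_alt (aList : List String) : List String :=
  let keyed := aList.foldl dealWithHyphensKeyedStep []
  (PySem.List.sorted keyed (fun t => t.1)).map (fun t => t.2)

-- ===== PRECONDITION & SPEC =====
def Spec_dealWithHyphens (aList : List String) (out : List String) : Prop := out = dealWithHyphens_alt aList
instance (aList : List String) (out : List String) : Decidable (Spec_dealWithHyphens aList out) := by unfold Spec_dealWithHyphens; infer_instance

-- ===== CLAIM (what is proved, stated in full; the proofs are below) =====
def Claim_equal_dealWithHyphens : Prop := ∀ (aList : List String), Dom_dealWithHyphens aList → Spec_dealWithHyphens aList (dealWithHyphens aList)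

-- ===== LEMMAS AND PROOFS =====

theorem pvSetAppendLen {T : Type} (d : List T) (x : T) (r : List T) (y : T) :
    (d ++ x :: r).set d.length y = d ++ y :: r := by
  induction d with
  | nil => rfl
  | cons a d ih => simp [ih]

-- proof-side characterisation: heads and tails of a (already '-'-filtered) word list
def dealWithHyphensSplit : List String → List String × List String
  | [] => ([], [])
  | w :: ws =>
    let (hs, ts) := dealWithHyphensSplit ws
    let i := PySem.Str.find w "--"
    if i = -1 then (w :: hs, ts)
    else (PySem.Str.slice w none (some i) :: hs,
          PySem.Str.slice w (some (i + 2)) none :: ts)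

-- loop invariant for A: processing 'pending' after 'done' heads with 'tails' collected
theorem dealWithHyphens_loop (pending done tails : List String) :
    (PySem.List.pyRange done.length (done.length + pending.length) 1).foldl
        dealWithHyphensStep (done ++ pending ++ tails)
      = done ++ (dealWithHyphensSplit pending).1 ++ tails ++ (dealWithHyphensSplit pending).2 := by
  induction pending generalizing done tails with
  | nil => simp [PySem.List.pyRange_one_eq_nil, dealWithHyphensSplit]
  | cons w ws ih =>
    have hrange : PySem.List.pyRange (done.length : Int) (done.length + (w :: ws).length) 1
        = (done.length : Int) :: PySem.List.pyRange ((done.length : Int) + 1) ((done.length : Int) + (w :: ws).length) 1 := by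
      apply PySem.List.pyRange_one_cons
      simp
    rw [hrange, List.foldl_cons]
    have hget : dealWithHyphensStep (done ++ (w :: ws) ++ tails) (done.length : Int) =
        if PySem.Str.isIn "--" w then
          ((done ++ (w :: ws) ++ tails) ++ [PySem.Str.slice w (some (PySem.Str.find w "--" + 2)) none]).set
            done.length (PySem.Str.slice w (some 0) (some (PySem.Str.find w "--")))
        else (done ++ (w :: ws) ++ tails) := by
      simp [dealWithHyphensStep, PySem.List.pyGet?_natCast]
    rw [hget]
    by_cases hf : PySem.Str.find w "--" = -1
    · have hin : PySem.Str.isIn "--" w = false := by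
        have h1 := (PySem.Str.find_eq_neg_one_iff w "--").mp hf
        exact Bool.eq_false_iff.mpr (fun h => h1 ((PySem.Str.isIn_iff_infix _ _).mp h))
      rw [hin]
      simp only [Bool.false_eq_true, if_false]
      rw [show ((done.length : Int) + ((w :: ws).length : Int)) = (((done ++ [w]).length : Int) + (ws.length : Int)) by simp; ring,
          show ((done.length : Int) + 1) = ((done ++ [w]).length : Int) by simp,
          show done ++ w :: ws ++ tails = (done ++ [w]) ++ ws ++ tails by simp,
          ih (done ++ [w]) tails]
      have hf' : PySem.Chars.find w.toList ['-', '-'] = -1 := by simpa using hf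
      simp [dealWithHyphensSplit, hf']
    · have hin : PySem.Str.isIn "--" w = true := by
        rw [PySem.Str.isIn_iff_infix]
        by_contra hc
        exact hf ((PySem.Str.find_eq_neg_one_iff w "--").mpr hc)
      rw [hin]
      simp only [if_true]
      rw [show done ++ w :: ws ++ tails ++ [PySem.Str.slice w (some (PySem.Str.find w "--" + 2)) none]
            = done ++ w :: (ws ++ tails ++ [PySem.Str.slice w (some (PySem.Str.find w "--" + 2)) none]) by simp,
          pvSetAppendLen]
      rw [show done ++ PySem.Str.slice w (some 0) (some (PySem.Str.find w "--")) :: (ws ++ tails ++ [PySem.Str.slice w (some (PySem.Str.find w "--" + 2)) none])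
            = (done ++ [PySem.Str.slice w (some 0) (some (PySem.Str.find w "--"))]) ++ ws ++ (tails ++ [PySem.Str.slice w (some (PySem.Str.find w "--" + 2)) none]) by simp,
          show ((done.length : Int) + ((w :: ws).length : Int)) = (((done ++ [PySem.Str.slice w (some 0) (some (PySem.Str.find w "--"))]).length : Int) + (ws.length : Int)) by simp; ring,
          show ((done.length : Int) + 1) = ((done ++ [PySem.Str.slice w (some 0) (some (PySem.Str.find w "--"))]).length : Int) by simp,
          ih (done ++ [PySem.Str.slice w (some 0) (some (PySem.Str.find w "--"))]) (tails ++ [PySem.Str.slice w (some (PySem.Str.find w "--" + 2)) none])]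
      have hf' : ¬ PySem.Chars.find w.toList ['-', '-'] = -1 := by simpa using hf
      simp [dealWithHyphensSplit, hf', PySem.Str.slice]

-- the ranked entries produced for one kept word
def dwhEntries (w : String) : List (Int × String) :=
  if PySem.Str.find w "--" = -1 then [((0 : Int), w)]
  else [((0 : Int), PySem.Str.slice w none (some (PySem.Str.find w "--"))),
        ((1 : Int), PySem.Str.slice w (some (PySem.Str.find w "--" + 2)) none)]

-- B's first loop builds exactly the flatMap of entries over the '-'-filtered list
theorem dwhKeyed_eq (ws : List String) (acc : List (Int × String)) :
    ws.foldl dealWithHyphensKeyedStep acc = acc ++ (ws.filter (fun x => x ≠ "-")).flatMap dwhEntries := by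
  induction ws generalizing acc with
  | nil => simp
  | cons w ws ih =>
    by_cases hw : w = "-"
    · simp [dealWithHyphensKeyedStep, hw, ih]
    · simp [dealWithHyphensKeyedStep, hw, ih, dwhEntries]
      split_ifs <;> simp

-- inserting a rank-0 element into (ranked-0 block ++ ranked-1 block) lands at the block boundary
theorem dwhInsert_rank0 (hs ts : List (Int × String)) (x : Int × String)
    (hh : ∀ p ∈ hs, p.1 = 0) (ht : ∀ p ∈ ts, p.1 = 1) (hx : x.1 = 0) :
    PySem.List.insertBy (fun a b => decide (a.1 < b.1)) x (hs ++ ts) = hs ++ x :: ts := by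
  induction hs with
  | nil =>
    cases ts with
    | nil => rfl
    | cons t ts' =>
      have h1 : t.1 = 1 := ht t (by simp)
      simp [PySem.List.insertBy, hx, h1]
  | cons h hs' ih =>
    have h0 : h.1 = 0 := hh h (by simp)
    simp [PySem.List.insertBy, hx, h0]
    exact ih (fun p hp => hh p (by simp [hp]))

-- inserting a rank-1 element into a list of ranks ≤ 1 appends it at the end
theorem dwhInsert_rank1 (l : List (Int × String)) (x : Int × String)
    (hl : ∀ p ∈ l, p.1 ≤ 1) (hx : x.1 = 1) :
    PySem.List.insertBy (fun a b => decide (a.1 < b.1)) x l = l ++ [x] := by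
  apply PySem.List.insertBy_of_forall_not_before
  intro y hy
  have := hl y hy
  simp [hx]
  omega

theorem dwhSort_loop (ws : List String) (hs ts : List (Int × String))
    (hh : ∀ p ∈ hs, p.1 = 0) (ht : ∀ p ∈ ts, p.1 = 1) :
    (ws.flatMap dwhEntries).foldl
        (fun acc x => PySem.List.insertBy (fun a b => decide (a.1 < b.1)) x acc) (hs ++ ts)
      = hs ++ (dealWithHyphensSplit ws).1.map (fun s => ((0 : Int), s))
          ++ ts ++ (dealWithHyphensSplit ws).2.map (fun s => ((1 : Int), s)) := by
  induction ws generalizing hs ts with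
  | nil => simp [dealWithHyphensSplit]
  | cons w ws ih =>
    by_cases hf : PySem.Str.find w "--" = -1
    · have hfc : PySem.Chars.find w.toList ['-', '-'] = -1 := by simpa using hf
      have hE : (w :: ws).flatMap dwhEntries = ((0 : Int), w) :: ws.flatMap dwhEntries := by
        simp [dwhEntries, hfc]
      have hh' : ∀ p ∈ hs ++ [((0 : Int), w)], p.1 = 0 := by
        intro p hp
        rcases List.mem_append.mp hp with h | h
        · exact hh p h
        · simp at h; simp [h]
      rw [hE, List.foldl_cons, dwhInsert_rank0 hs ts _ hh ht rfl,
          show hs ++ ((0 : Int), w) :: ts = (hs ++ [((0 : Int), w)]) ++ ts by simp,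
          ih (hs ++ [((0 : Int), w)]) ts hh' ht]
      simp [dealWithHyphensSplit, hfc]
    · have hE : (w :: ws).flatMap dwhEntries
          = ((0 : Int), PySem.Str.slice w none (some (PySem.Str.find w "--")))
            :: ((1 : Int), PySem.Str.slice w (some (PySem.Str.find w "--" + 2)) none)
            :: ws.flatMap dwhEntries := by
        have hfc : ¬ PySem.Chars.find w.toList ['-', '-'] = -1 := by simpa using hf
        simp [dwhEntries, hfc]
      have hh' : ∀ p ∈ hs ++ [((0 : Int), PySem.Str.slice w none (some (PySem.Str.find w "--")))], p.1 = 0 := by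
        intro p hp
        rcases List.mem_append.mp hp with h | h
        · exact hh p h
        · simp at h; simp [h]
      have ht' : ∀ p ∈ ts ++ [((1 : Int), PySem.Str.slice w (some (PySem.Str.find w "--" + 2)) none)], p.1 = 1 := by
        intro p hp
        rcases List.mem_append.mp hp with h | h
        · exact ht p h
        · simp at h; simp [h]
      have hle : ∀ p ∈ (hs ++ [((0 : Int), PySem.Str.slice w none (some (PySem.Str.find w "--")))]) ++ ts, p.1 ≤ 1 := by
        intro p hp
        rcases List.mem_append.mp hp with h | h
        · rw [hh' p h]; omega
        · rw [ht p h]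
      rw [hE, List.foldl_cons, List.foldl_cons, dwhInsert_rank0 hs ts _ hh ht rfl,
          show hs ++ ((0 : Int), PySem.Str.slice w none (some (PySem.Str.find w "--"))) :: ts
            = (hs ++ [((0 : Int), PySem.Str.slice w none (some (PySem.Str.find w "--")))]) ++ ts by simp,
          dwhInsert_rank1 _ _ hle rfl, List.append_assoc,
          ih (hs ++ [((0 : Int), PySem.Str.slice w none (some (PySem.Str.find w "--")))])
             (ts ++ [((1 : Int), PySem.Str.slice w (some (PySem.Str.find w "--" + 2)) none)]) hh' ht']
      have hfc : ¬ PySem.Chars.find w.toList ['-', '-'] = -1 := by simpa using hf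
      simp [dealWithHyphensSplit, hfc]

theorem dealWithHyphens_A_eq (aList : List String) :
    dealWithHyphens aList
      = (dealWithHyphensSplit (aList.filter (fun x => x ≠ "-"))).1
        ++ (dealWithHyphensSplit (aList.filter (fun x => x ≠ "-"))).2 := by
  have hA := dealWithHyphens_loop (aList.filter (fun x => x ≠ "-")) [] []
  simpa [dealWithHyphens] using hA

theorem dealWithHyphens_B_eq (aList : List String) :
    dealWithHyphens_alt aList
      = (dealWithHyphensSplit (aList.filter (fun x => x ≠ "-"))).1
        ++ (dealWithHyphensSplit (aList.filter (fun x => x ≠ "-"))).2 := by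
  have hB := dwhSort_loop (aList.filter (fun x => x ≠ "-")) [] []
      (by intro p hp; simp at hp) (by intro p hp; simp at hp)
  simp only [List.nil_append, List.append_nil] at hB
  rw [dealWithHyphens_alt, dwhKeyed_eq, List.nil_append,
      PySem.List.sorted_eq_foldl_insertBy, hB]
  simp

-- ===== VERDICT (by name: the statement is the Claim_ definition above) =====
theorem dealWithHyphens_spec : Claim_equal_dealWithHyphens := by
  intro aList _
  show dealWithHyphens aList = dealWithHyphens_alt aList
  rw [dealWithHyphens_A_eq, dealWithHyphens_B_eq]
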